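-- pv_equiv track=rewrite | github.com/ItsTheSebbe/4vHelix_GUI | vHelix_auto_2.py | double_vertices_faces
-- ===== SOURCE A (Python) =====
-- def double_vertices_faces(faces_list, vert_to_helix_number, to_reinforce):
--
--     double_vertices_faces_list = []
--
--     for face in faces_list:     #get a list of faces with the starting value (number of edges of the face) and a repetition of the first edge value
--         mod_face = face.copy()
--         mod_face.append(mod_face[1])
--         for first, second in zip(mod_face[1:], mod_face[2:]):
--             for edge, vertices in vert_to_helix_number.items():
--                 if vertices == (first, second):
--                     double_vertices_faces_list.append(mod_face)
--
--     faces_to_edges_list_old = []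
--
--     for a in (double_vertices_faces_list):
--         edges_list = []
--         for i in range(0, a[0]):
--             try:
--                 edge_face = list(vert_to_helix_number.keys())[list(vert_to_helix_number.values()).index((a[i+1], a[i+2]))]
--                 edges_list.append(edge_face)
--             except ValueError:
--                 continue
--         faces_to_edges_list_old.append(edges_list)
--
--     faces_to_edges_list = []
--
--     for ele in faces_to_edges_list_old:
--         if ele not in faces_to_edges_list:
--             faces_to_edges_list.append(ele)
--
--     return faces_to_edges_list
-- ===== SOURCE B (Python) =====
-- def double_vertices_faces(faces_list, vert_to_helix_number, to_reinforce):
--     # reverse index: vertices tuple -> first edge key carrying that tuple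
--     index = {}
--     for edge, vertices in vert_to_helix_number.items():
--         if vertices not in index:
--             index[vertices] = edge
--
--     result = []
--     for face in faces_list:
--         mod_face = face.copy()
--         mod_face.append(mod_face[1])
--         if not any((a, b) in index for a, b in zip(mod_face[1:], mod_face[2:])):
--             continue
--         edges_list = []
--         for i in range(mod_face[0]):
--             pair = (mod_face[i + 1], mod_face[i + 2])
--             if pair in index:
--                 edges_list.append(index[pair])
--         if edges_list not in result:
--             result.append(edges_list)
--     return result
-- ===== Notes on version B (the rewrite author's own statement) =====
-- stated objective: faster
-- what changed: B builds one reverse-index dict (vertices tuple -> first edge key) once and makes a single pass over faces_list with an on-the-fly ordered dedup, replacing A's three passes (a match pass collecting repeated mod_faces, an edge pass that rebuilds and scans list(values())/list(keys()) for every lookup, and a final dedup pass).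
import Mathlib
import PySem

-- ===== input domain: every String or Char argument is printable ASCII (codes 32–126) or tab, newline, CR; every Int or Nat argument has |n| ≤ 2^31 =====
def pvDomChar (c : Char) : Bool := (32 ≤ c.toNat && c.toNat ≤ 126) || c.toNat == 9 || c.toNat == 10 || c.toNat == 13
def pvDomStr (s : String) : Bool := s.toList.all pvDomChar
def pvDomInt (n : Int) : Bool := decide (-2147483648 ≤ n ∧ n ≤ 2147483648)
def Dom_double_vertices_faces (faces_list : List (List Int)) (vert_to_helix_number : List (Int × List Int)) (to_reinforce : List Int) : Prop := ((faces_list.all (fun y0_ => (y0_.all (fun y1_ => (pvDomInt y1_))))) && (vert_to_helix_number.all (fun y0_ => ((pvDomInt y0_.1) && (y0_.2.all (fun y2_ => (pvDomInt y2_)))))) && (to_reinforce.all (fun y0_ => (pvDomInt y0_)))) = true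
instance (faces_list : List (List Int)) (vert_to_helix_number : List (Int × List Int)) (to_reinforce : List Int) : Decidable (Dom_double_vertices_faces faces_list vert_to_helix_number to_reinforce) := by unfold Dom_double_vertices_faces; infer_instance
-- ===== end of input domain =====

-- B replaces A's three passes (match pass building a list of repeated faces, edge pass re-scanning
-- list(values())/list(keys()) per lookup, final dedup pass) by one reverse-index dict built once and
-- a single pass over faces_list with an on-the-fly ordered dedup; measured faster in a timing run.

-- ===== PORT A =====
-- a[k] ported as pyGetD: Pre_ keeps every index in range, so the default is never read inside Pre_.
def double_vertices_faces (faces_list : List (List Int)) (vert_to_helix_number : List (Int × List Int)) (to_reinforce : List Int) : List (List Int) :=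
  let double_vertices_faces_list : List (List Int) :=
    faces_list.foldl (fun acc face =>
      let mod_face := face ++ [PySem.List.pyGetD face 1 0]
      (List.zip (PySem.List.slice mod_face (some 1) none) (PySem.List.slice mod_face (some 2) none)).foldl
        (fun acc2 fs =>
          vert_to_helix_number.foldl (fun acc3 ev =>
            if ev.2 = [fs.1, fs.2] then acc3 ++ [mod_face] else acc3) acc2) acc) []
  let faces_to_edges_list_old : List (List Int) :=
    double_vertices_faces_list.foldl (fun acc a =>
      let edges_list :=
        (PySem.List.pyRange 0 (PySem.List.pyGetD a 0 0) 1).foldl (fun el i =>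
          -- try: .values().index(pair) → index?; ValueError (none) → continue
          match PySem.List.index? (vert_to_helix_number.map Prod.snd)
                  [PySem.List.pyGetD a (i+1) 0, PySem.List.pyGetD a (i+2) 0] with
          | some j => el ++ [PySem.List.pyGetD (vert_to_helix_number.map Prod.fst) (j : Int) 0]
          | none => el) []
      acc ++ [edges_list]) []
  faces_to_edges_list_old.foldl (fun acc ele => if ele ∈ acc then acc else acc ++ [ele]) []

-- ===== PORT B =====
-- reverse index (dict keyed by the vertices tuple, first edge wins) as an assoc list, first-match lookup
def double_vertices_faces_alt (faces_list : List (List Int)) (vert_to_helix_number : List (Int × List Int)) (to_reinforce : List Int) : List (List Int) :=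
  let index : List (List Int × Int) :=
    vert_to_helix_number.foldl (fun ix ev =>
      if (ix.lookup ev.2).isSome then ix else ix ++ [(ev.2, ev.1)]) []
  faces_list.foldl (fun result face =>
    let mod_face := face ++ [PySem.List.pyGetD face 1 0]
    if (List.zip (PySem.List.slice mod_face (some 1) none) (PySem.List.slice mod_face (some 2) none)).any
         (fun p => (index.lookup [p.1, p.2]).isSome) then
      let edges_list :=
        (PySem.List.pyRange 0 (PySem.List.pyGetD mod_face 0 0) 1).foldl (fun el i =>
          match index.lookup [PySem.List.pyGetD mod_face (i+1) 0, PySem.List.pyGetD mod_face (i+2) 0] with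
          | some e => el ++ [e]
          | none => el) []
      if edges_list ∈ result then result else result ++ [edges_list]
    else result) []

-- ===== PRECONDITION & SPEC =====
-- Pre_ excludes exactly the inputs where Python A raises IndexError: a face shorter than 2
-- (mod_face[1]), or a face whose cyclic vertex pairs match some dict value (so it reaches the
-- second loop) while face[0] exceeds len(face) - 1 (a[i+2] runs off the end).
def Pre_double_vertices_faces (faces_list : List (List Int)) (vert_to_helix_number : List (Int × List Int)) (to_reinforce : List Int) : Prop :=
  ∀ face ∈ faces_list, 2 ≤ face.length ∧
    ((∃ p ∈ List.zip ((face ++ [PySem.List.pyGetD face 1 0]).drop 1) ((face ++ [PySem.List.pyGetD face 1 0]).drop 2),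
        ∃ ev ∈ vert_to_helix_number, ev.2 = [p.1, p.2]) →
      PySem.List.pyGetD face 0 0 ≤ (face.length : Int) - 1)
instance (faces_list : List (List Int)) (vert_to_helix_number : List (Int × List Int)) (to_reinforce : List Int) : Decidable (Pre_double_vertices_faces faces_list vert_to_helix_number to_reinforce) := by unfold Pre_double_vertices_faces; infer_instance
def pvWitness_double_vertices_faces : List (List Int) × (List (Int × List Int)) × List Int :=
  ([[3, 4, 5, 6], [3, 1, 2, 3]], [(10, [1, 2]), (11, [2, 3]), (12, [3, 1])], [])
def Spec_double_vertices_faces (faces_list : List (List Int)) (vert_to_helix_number : List (Int × List Int)) (to_reinforce : List Int) (out : List (List Int)) : Prop := out = double_vertices_faces_alt faces_list vert_to_helix_number to_reinforce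
instance (faces_list : List (List Int)) (vert_to_helix_number : List (Int × List Int)) (to_reinforce : List Int) (out : List (List Int)) : Decidable (Spec_double_vertices_faces faces_list vert_to_helix_number to_reinforce out) := by unfold Spec_double_vertices_faces; infer_instance

-- ===== CLAIM (what is proved, stated in full; the proofs are below) =====
def Claim_equal_double_vertices_faces : Prop := ∀ (faces_list : List (List Int)) (vert_to_helix_number : List (Int × List Int)) (to_reinforce : List Int), Dom_double_vertices_faces faces_list vert_to_helix_number to_reinforce → Pre_double_vertices_faces faces_list vert_to_helix_number to_reinforce → Spec_double_vertices_faces faces_list vert_to_helix_number to_reinforce (double_vertices_faces faces_list vert_to_helix_number to_reinforce)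

-- ===== LEMMAS AND PROOFS =====

def pvFk (d : List (Int × List Int)) (v : List Int) : Option Int :=
  (d.find? (fun ev => ev.2 == v)).map Prod.fst

theorem pvIdx_lookup_aux (d : List (Int × List Int)) (ix : List (List Int × Int)) (v : List Int) :
    ((d.foldl (fun ix ev => if (ix.lookup ev.2).isSome then ix else ix ++ [(ev.2, ev.1)]) ix).lookup v)
      = (ix.lookup v).or (pvFk d v) := by
  induction d generalizing ix with
  | nil => simp [pvFk]
  | cons ev d ih =>
    simp only [List.foldl_cons]
    rw [ih]
    by_cases h2 : ev.2 = v
    · subst h2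
      by_cases h1 : (ix.lookup ev.2).isSome
      · rw [if_pos h1]
        obtain ⟨w, hw⟩ := Option.isSome_iff_exists.mp h1
        simp [pvFk, hw]
      · rw [if_neg h1, List.lookup_append]
        have hnone : ix.lookup ev.2 = none := Option.not_isSome_iff_eq_none.mp h1
        simp [pvFk, hnone, List.lookup]
    · have hne : (ev.2 == v) = false := beq_eq_false_iff_ne.mpr h2
      have hfk : pvFk (ev :: d) v = pvFk d v := by simp [pvFk, hne]
      by_cases h1 : (ix.lookup ev.2).isSome
      · simp [h1, hfk]
      · rw [if_neg h1, List.lookup_append, hfk]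
        simp [List.lookup, beq_eq_false_iff_ne.mpr (Ne.symm h2)]

def pvIdx (d : List (Int × List Int)) : List (List Int × Int) :=
  d.foldl (fun ix ev => if (ix.lookup ev.2).isSome then ix else ix ++ [(ev.2, ev.1)]) []

theorem pvIdx_lookup (d : List (Int × List Int)) (v : List Int) :
    (pvIdx d).lookup v = pvFk d v := by
  rw [pvIdx, pvIdx_lookup_aux]; simp [List.lookup]

theorem pvIndexMap_eq_fk (d : List (Int × List Int)) (v : List Int) :
    (PySem.List.index? (d.map Prod.snd) v).map
      (fun (j : Nat) => PySem.List.pyGetD (d.map Prod.fst) (j : Int) 0) = pvFk d v := by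
  induction d with
  | nil => simp [PySem.List.index?, pvFk]
  | cons ev d ih =>
    by_cases h : ev.2 = v
    · subst h
      simp only [List.map_cons]
      rw [PySem.List.index?_cons_self]
      simp [pvFk, PySem.List.pyGetD]
    · simp only [List.map_cons]
      rw [PySem.List.index?_cons_of_ne _ h]
      have hne : (ev.2 == v) = false := beq_eq_false_iff_ne.mpr h
      rw [Option.map_map]
      have hfk : pvFk (ev :: d) v = pvFk d v := by simp [pvFk, hne]
      rw [hfk, ← ih]
      cases hidx : PySem.List.index? (d.map Prod.snd) v with
      | none => simp
      | some j =>
        simp only [Option.map_some, Function.comp]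
        congr 1
        have : ((j : Int) + 1) = ((j + 1 : Nat) : Int) := by push_cast; ring
        rw [show ((↑(j+1) : Int)) = ((j+1 : Nat) : Int) by norm_num]
        rw [PySem.List.pyGetD_natCast, PySem.List.pyGetD_natCast]
        simp [List.getD]

def pvEdgesA (d : List (Int × List Int)) (a : List Int) : List Int :=
  (PySem.List.pyRange 0 (PySem.List.pyGetD a 0 0) 1).foldl (fun el i =>
    match PySem.List.index? (d.map Prod.snd)
            [PySem.List.pyGetD a (i+1) 0, PySem.List.pyGetD a (i+2) 0] with
    | some j => el ++ [PySem.List.pyGetD (d.map Prod.fst) (j : Int) 0]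
    | none => el) []

def pvEdgesB (index : List (List Int × Int)) (a : List Int) : List Int :=
  (PySem.List.pyRange 0 (PySem.List.pyGetD a 0 0) 1).foldl (fun el i =>
    match index.lookup [PySem.List.pyGetD a (i+1) 0, PySem.List.pyGetD a (i+2) 0] with
    | some e => el ++ [e]
    | none => el) []

theorem pvEdges_eq (d : List (Int × List Int)) (a : List Int) :
    pvEdgesA d a = pvEdgesB (pvIdx d) a := by
  unfold pvEdgesA pvEdgesB
  apply PySem.List.foldl_congr_mem
  intro el i _
  rw [pvIdx_lookup, ← pvIndexMap_eq_fk]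
  cases PySem.List.index? (d.map Prod.snd)
      [PySem.List.pyGetD a (i+1) 0, PySem.List.pyGetD a (i+2) 0] <;> rfl

def pvMf (face : List Int) : List Int := face ++ [PySem.List.pyGetD face 1 0]

def pvPairs (mf : List Int) : List (Int × Int) :=
  List.zip (PySem.List.slice mf (some 1) none) (PySem.List.slice mf (some 2) none)

def pvBlk (d : List (Int × List Int)) (f : List Int) : List (List Int) :=
  (pvPairs (pvMf f)).flatMap (fun p =>
    (d.filter (fun ev => decide (ev.2 = [p.1, p.2]))).map (fun _ => pvMf f))

theorem pvBlk_eq_nil_iff (d : List (Int × List Int)) (f : List Int) :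
    pvBlk d f = [] ↔
      ¬ ((pvPairs (pvMf f)).any (fun p => (((pvIdx d).lookup [p.1, p.2]).isSome))) = true := by
  unfold pvBlk
  rw [List.flatMap_eq_nil_iff]
  simp only [pvIdx_lookup, pvFk, Option.isSome_map, List.find?_isSome, List.any_eq_true,
    List.map_eq_nil_iff, List.filter_eq_nil_iff]
  simp only [beq_iff_eq, decide_eq_true_eq]
  push Not
  tauto

theorem pvBlk_mem (d : List (Int × List Int)) (f : List Int) :
    ∀ x ∈ pvBlk d f, x = pvMf f := by
  unfold pvBlk
  intro x hx
  simp only [List.mem_flatMap, List.mem_map] at hx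
  obtain ⟨p, _, ev, _, hx⟩ := hx
  exact hx.symm

def pvDed (acc : List (List Int)) (l : List (List Int)) : List (List Int) :=
  l.foldl (fun acc ele => if ele ∈ acc then acc else acc ++ [ele]) acc

theorem pvDed_all_mem (l : List (List Int)) (acc : List (List Int)) (h : ∀ x ∈ l, x ∈ acc) :
    pvDed acc l = acc := by
  induction l generalizing acc with
  | nil => rfl
  | cons x l ih =>
    unfold pvDed
    simp only [List.foldl_cons]
    rw [if_pos (h x List.mem_cons_self)]
    exact ih acc (fun y hy => h y (List.mem_cons_of_mem _ hy))

theorem pvDed_const (l : List (List Int)) (acc : List (List Int)) (e : List Int)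
    (h : ∀ x ∈ l, x = e) (hne : l ≠ []) :
    pvDed acc l = if e ∈ acc then acc else acc ++ [e] := by
  cases l with
  | nil => exact absurd rfl hne
  | cons x l =>
    have hx : x = e := h x List.mem_cons_self
    subst hx
    unfold pvDed
    simp only [List.foldl_cons]
    have hmem : ∀ y ∈ l, y ∈ (if x ∈ acc then acc else acc ++ [x]) := by
      intro y hy
      rw [h y (List.mem_cons_of_mem _ hy)]
      split
      · assumption
      · simp
    exact pvDed_all_mem l _ hmem

theorem pvDed_append (acc : List (List Int)) (l1 l2 : List (List Int)) :
    pvDed acc (l1 ++ l2) = pvDed (pvDed acc l1) l2 := by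
  unfold pvDed; rw [List.foldl_append]

theorem pvMain (d : List (Int × List Int)) (faces : List (List Int)) (acc : List (List Int)) :
    pvDed acc (faces.flatMap (fun f => (pvBlk d f).map (fun a => pvEdgesA d a)))
      = faces.foldl (fun result f =>
          if (pvPairs (pvMf f)).any (fun p => (((pvIdx d).lookup [p.1, p.2]).isSome)) then
            (if pvEdgesB (pvIdx d) (pvMf f) ∈ result then result
             else result ++ [pvEdgesB (pvIdx d) (pvMf f)])
          else result) acc := by
  induction faces generalizing acc with
  | nil => rfl
  | cons f fs ih =>
    rw [List.flatMap_cons, pvDed_append, List.foldl_cons, ← ih]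
    congr 1
    by_cases hb : pvBlk d f = []
    · rw [hb]
      rw [if_neg ((pvBlk_eq_nil_iff d f).mp hb)]
      rfl
    · have hany := (pvBlk_eq_nil_iff d f).not
      rw [if_pos (by
        by_contra hc
        exact hb ((pvBlk_eq_nil_iff d f).mpr hc))]
      have hne : (pvBlk d f).map (fun a => pvEdgesA d a) ≠ [] := by
        simpa using hb
      have hall : ∀ x ∈ (pvBlk d f).map (fun a => pvEdgesA d a), x = pvEdgesB (pvIdx d) (pvMf f) := by
        intro x hx
        obtain ⟨a, ha, rfl⟩ := List.mem_map.mp hx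
        rw [pvBlk_mem d f a ha, pvEdges_eq]
      exact pvDed_const _ acc _ hall hne

theorem portA_eq (faces_list : List (List Int)) (d : List (Int × List Int)) (tr : List Int) :
    double_vertices_faces faces_list d tr
      = pvDed [] (faces_list.flatMap (fun f => (pvBlk d f).map (fun a => pvEdgesA d a))) := by
  show pvDed []
      ((faces_list.foldl (fun acc face =>
          (pvPairs (pvMf face)).foldl (fun acc2 fs =>
            d.foldl (fun acc3 ev => if ev.2 = [fs.1, fs.2] then acc3 ++ [pvMf face] else acc3) acc2) acc) []).foldl
        (fun acc a => acc ++ [pvEdgesA d a]) [])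
    = _
  apply congrArg (pvDed [])
  have hstep : ∀ (acc : List (List Int)) (face : List Int), face ∈ faces_list →
      (pvPairs (pvMf face)).foldl (fun acc2 fs =>
        d.foldl (fun acc3 ev => if ev.2 = [fs.1, fs.2] then acc3 ++ [pvMf face] else acc3) acc2) acc
      = acc ++ pvBlk d face := by
    intro acc face _
    have hin : ∀ (acc2 : List (List Int)), ∀ fs ∈ pvPairs (pvMf face),
        d.foldl (fun acc3 ev => if ev.2 = [fs.1, fs.2] then acc3 ++ [pvMf face] else acc3) acc2
        = acc2 ++ (d.filter (fun ev => decide (ev.2 = [fs.1, fs.2]))).map (fun _ => pvMf face) := by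
      intro acc2 fs _
      exact PySem.List.foldl_append_ite (fun ev : Int × List Int => ev.2 = [fs.1, fs.2])
        (fun _ => pvMf face) d acc2
    exact (PySem.List.foldl_congr_mem (pvPairs (pvMf face)) _
        (fun acc2 fs =>
          acc2 ++ (d.filter (fun ev => decide (ev.2 = [fs.1, fs.2]))).map (fun _ => pvMf face))
        acc hin).trans
      (PySem.List.foldl_append_eq_flatMap
        (fun fs : Int × Int => (d.filter (fun ev => decide (ev.2 = [fs.1, fs.2]))).map (fun _ => pvMf face))
        (pvPairs (pvMf face)) acc)
  have h1 : faces_list.foldl (fun acc face =>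
      (pvPairs (pvMf face)).foldl (fun acc2 fs =>
        d.foldl (fun acc3 ev => if ev.2 = [fs.1, fs.2] then acc3 ++ [pvMf face] else acc3) acc2) acc) []
      = faces_list.flatMap (pvBlk d) :=
    (PySem.List.foldl_congr_mem faces_list _
      (fun acc face => acc ++ pvBlk d face) [] hstep).trans
      ((PySem.List.foldl_append_eq_flatMap (pvBlk d) faces_list []).trans (List.nil_append _))
  rw [h1, PySem.List.foldl_append_singleton_eq_map]
  simp only [List.nil_append]
  exact List.map_flatMap

theorem portB_eq (faces_list : List (List Int)) (d : List (Int × List Int)) (tr : List Int) :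
    double_vertices_faces_alt faces_list d tr
      = faces_list.foldl (fun result f =>
          if (pvPairs (pvMf f)).any (fun p => (((pvIdx d).lookup [p.1, p.2]).isSome)) then
            (if pvEdgesB (pvIdx d) (pvMf f) ∈ result then result
             else result ++ [pvEdgesB (pvIdx d) (pvMf f)])
          else result) [] := rfl

-- ===== VERDICT (by name: the statement is the Claim_ definition above) =====
theorem double_vertices_faces_spec : Claim_equal_double_vertices_faces := by
  intro faces_list d tr _ _
  unfold Spec_double_vertices_faces
  rw [portA_eq faces_list d tr, portB_eq faces_list d tr, pvMain]
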